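-- pv_equiv track=rewrite | github.com/Goodmytoy/Passenger_Demand | model/Preprocessing/holiday.py | find_seq_y
-- ===== SOURCE A (Python) =====
-- def find_seq_y(data,
--                criterion = 3):
--     """
--         Y/N 중에 일정 횟수 이상 연속된 Y의 수를 체크하는 함수
--         e.g.) 기준 : 3일
--         (Y,Y,Y,N,N,Y,Y,N,N,Y,Y) -> (3,3,3,0,0,0,0,0,0,0,0)
--
--         Args:
--             data: Y/N 리스트 (list, Pandas Series)
--             criterion: 날짜 컬럼명 (str)
--
--         Returns:
--             data: lag feature를 생성한 데이터 (Pandas.DataFrame)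
--
--         Exception:
--
--     """
--     seq_list = []
--     Y_cnt = 0
--     for i, x in enumerate(data):
--         # Y인 동안은 Y의 개수를 누적
--         if x == "Y":
--             Y_cnt += 1
--         # N이 등장하거나, 데이터의 끝에 도달한 경우,
--         #
--         if (x == "N") | (i == len(data)):
--             if Y_cnt >= criterion:
--                 temp_list = ["Y"] * Y_cnt
--                 seq_list += temp_list
--             elif (Y_cnt > 0) & (Y_cnt < criterion):
--                 temp_list = ["N"] * Y_cnt
--                 seq_list += temp_list
--             seq_list.append("N")
--             Y_cnt = 0
--
--     return seq_list
-- ===== SOURCE B (Python) =====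
-- def find_seq_y(data, criterion=3):
--     # Two-phase decomposition: split the data into segments closed by an "N",
--     # then emit one block per closed segment.  The trailing segment is not
--     # terminated by an "N", so it produces no output (as in the original).
--     segs = []
--     cur = []
--     for x in data:
--         if x == "N":
--             segs.append(cur)
--             cur = []
--         else:
--             cur.append(x)
--     out = []
--     for seg in segs:
--         cnt = seg.count("Y")
--         if cnt >= criterion:
--             out += ["Y"] * cnt
--         elif cnt > 0:
--             out += ["N"] * cnt
--         out.append("N")
--     return out
-- ===== Notes on version B (the rewrite author's own statement) =====
-- stated objective: alternative
-- what changed: Replaces A's single pass with an inline running Y-counter and end-of-list check by a two-phase decomposition: first split the data into segments closed by an 'N', then map each closed segment to its output block via its Y-count.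
import Mathlib
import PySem

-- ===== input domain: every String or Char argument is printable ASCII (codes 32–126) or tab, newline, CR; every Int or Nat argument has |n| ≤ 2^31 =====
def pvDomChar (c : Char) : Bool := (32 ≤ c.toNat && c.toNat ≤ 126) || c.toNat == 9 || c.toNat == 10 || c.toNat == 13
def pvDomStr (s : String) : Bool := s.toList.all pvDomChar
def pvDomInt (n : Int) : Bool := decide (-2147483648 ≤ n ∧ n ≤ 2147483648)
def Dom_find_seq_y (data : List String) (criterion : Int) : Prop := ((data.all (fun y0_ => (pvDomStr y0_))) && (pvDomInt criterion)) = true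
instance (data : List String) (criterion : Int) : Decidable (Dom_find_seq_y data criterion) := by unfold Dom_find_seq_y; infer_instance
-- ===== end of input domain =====

-- B replaces A's single pass with a running Y-counter by a split-into-N-closed-segments
-- pass followed by a per-segment emission pass (alternative decomposition, same cost).
-- Like A, it emits nothing for the trailing segment not closed by an "N".

-- ===== PORT A =====
-- loop body of A (named for the proofs; the code is A's loop, step for step)
def pvStepA (data : List String) (criterion : Int) (st : List String × Int) (p : Int × String) : List String × Int :=
  let cnt := if p.2 = "Y" then st.2 + 1 else st.2
  if p.2 = "N" ∨ p.1 = (data.length : Int) then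
    let seq := if cnt ≥ criterion then st.1 ++ List.replicate cnt.toNat "Y"
      else if 0 < cnt ∧ cnt < criterion then st.1 ++ List.replicate cnt.toNat "N"
      else st.1
    (seq ++ ["N"], 0)
  else (st.1, cnt)

def find_seq_y (data : List String) (criterion : Int) : List String :=
  ((PySem.List.enumerate data 0).foldl (pvStepA data criterion) ([], 0)).1

-- ===== PORT B =====
-- first pass of B: split into segments closed by an "N", plus the open trailing segment
def pvSplitStep (st : List (List String) × List String) (x : String) : List (List String) × List String :=
  if x = "N" then (st.1 ++ [st.2], []) else (st.1, st.2 ++ [x])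

-- second pass of B: emit the block of one closed segment
def pvEmitStep (criterion : Int) (out : List String) (seg : List String) : List String :=
  let cnt : Int := (seg.count "Y" : Nat)
  let out := if cnt ≥ criterion then out ++ List.replicate cnt.toNat "Y"
    else if 0 < cnt then out ++ List.replicate cnt.toNat "N"
    else out
  out ++ ["N"]

def find_seq_y_alt (data : List String) (criterion : Int) : List String :=
  let st := data.foldl pvSplitStep ([], [])
  st.1.foldl (pvEmitStep criterion) []

-- ===== PRECONDITION & SPEC =====
def Spec_find_seq_y (data : List String) (criterion : Int) (out : List String) : Prop := out = find_seq_y_alt data criterion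
instance (data : List String) (criterion : Int) (out : List String) : Decidable (Spec_find_seq_y data criterion out) := by unfold Spec_find_seq_y; infer_instance

-- ===== CLAIM (what is proved, stated in full; the proofs are below) =====
def Claim_equal_find_seq_y : Prop := ∀ (data : List String) (criterion : Int), Dom_find_seq_y data criterion → Spec_find_seq_y data criterion (find_seq_y data criterion)

-- ===== LEMMAS AND PROOFS =====

-- A's step with the (never-firing) end-of-list test removed, on the item alone
def pvStepA' (criterion : Int) (st : List String × Int) (x : String) : List String × Int :=
  let cnt := if x = "Y" then st.2 + 1 else st.2
  if x = "N" then
    let seq := if cnt ≥ criterion then st.1 ++ List.replicate cnt.toNat "Y"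
      else if 0 < cnt ∧ cnt < criterion then st.1 ++ List.replicate cnt.toNat "N"
      else st.1
    (seq ++ ["N"], 0)
  else (st.1, cnt)

-- the block emitted for a run containing c "Y"s
def pvBlockC (criterion : Int) (c : Nat) : List String :=
  if (c : Int) ≥ criterion then List.replicate c "Y"
  else if 0 < c then List.replicate c "N" else []

-- common reference result: process the remaining items with c "Y"s pending
def pvBody (criterion : Int) : List String → Nat → List String
  | [], _ => []
  | x :: t, c =>
    if x = "N" then pvBlockC criterion c ++ ["N"] ++ pvBody criterion t 0
    else pvBody criterion t (if x = "Y" then c + 1 else c)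

-- B's splitter, as a recursion: (closed segments, trailing segment)
def pvSplit : List String → List String → List (List String) × List String
  | [], cur => ([], cur)
  | x :: t, cur =>
    if x = "N" then ((cur :: (pvSplit t []).1, (pvSplit t []).2))
    else pvSplit t (cur ++ [x])

theorem pvStepA_eq (data : List String) (criterion : Int)
    (st : List String × Int) (p : Int × String) (hp : p ∈ PySem.List.enumerate data 0) :
    pvStepA data criterion st p = pvStepA' criterion st p.2 := by
  rcases (PySem.List.mem_enumerate_iff _ _ _).1 hp with ⟨k, hk, rfl⟩
  have hne : k ≠ data.length := by omega
  simp [pvStepA, pvStepA', hne]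

theorem pvA_foldl (criterion : Int) (l : List String) (acc : List String) (c : Nat) :
    (l.foldl (pvStepA' criterion) (acc, (c : Int))).1 = acc ++ pvBody criterion l c := by
  induction l generalizing acc c with
  | nil => simp [pvBody]
  | cons x t ih =>
    rw [List.foldl_cons]
    by_cases hN : x = "N"
    · subst hN
      have hstep : pvStepA' criterion (acc, (c : Int)) "N" = (acc ++ pvBlockC criterion c ++ ["N"], (0 : Int)) := by
        simp [pvStepA', pvBlockC]
        split_ifs with h1 h2 h3 <;> (try (exfalso; omega)) <;> simp [List.append_assoc]
      rw [hstep]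
      have := ih (acc := acc ++ pvBlockC criterion c ++ ["N"]) (c := 0)
      simp only [Nat.cast_zero] at this
      rw [this]
      simp [pvBody]
    · by_cases hY : x = "Y"
      · subst hY
        have hstep : pvStepA' criterion (acc, (c : Int)) "Y" = (acc, ((c + 1 : Nat) : Int)) := by
          simp [pvStepA']
        rw [hstep, ih]
        simp [pvBody]
      · have hstep : pvStepA' criterion (acc, (c : Int)) x = (acc, (c : Int)) := by
          simp [pvStepA', hN, hY]
        rw [hstep, ih]
        simp [pvBody, hN, hY]

theorem pvSplit_foldl (l : List String) (segs : List (List String)) (cur : List String) :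
    l.foldl pvSplitStep (segs, cur) = (segs ++ (pvSplit l cur).1, (pvSplit l cur).2) := by
  induction l generalizing segs cur with
  | nil => simp [pvSplit]
  | cons x t ih =>
    by_cases hx : x = "N" <;> simp [pvSplit, pvSplitStep, hx, List.foldl_cons, ih]

theorem pvEmit_eq (criterion : Int) (out : List String) (seg : List String) :
    pvEmitStep criterion out seg = out ++ (pvBlockC criterion (seg.count "Y") ++ ["N"]) := by
  unfold pvEmitStep pvBlockC
  split_ifs with h1 h2
  all_goals simp_all [List.count_pos_iff, List.append_assoc]
  all_goals
    rw [if_neg (show ¬ criterion ≤ ((List.count "Y" seg : Nat) : Int) by omega)]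
    simp [List.append_assoc]

theorem pvEmit_foldl (criterion : Int) (segs : List (List String)) (out0 : List String) :
    segs.foldl (pvEmitStep criterion) out0
      = out0 ++ segs.flatMap (fun seg => pvBlockC criterion (seg.count "Y") ++ ["N"]) := by
  induction segs generalizing out0 with
  | nil => simp
  | cons s t ih =>
    rw [List.foldl_cons, pvEmit_eq, ih]
    simp

theorem pvSplit_body (criterion : Int) (l : List String) (cur : List String) :
    ((pvSplit l cur).1).flatMap (fun seg => pvBlockC criterion (seg.count "Y") ++ ["N"])
      = pvBody criterion l (cur.count "Y") := by
  induction l generalizing cur with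
  | nil => simp [pvSplit, pvBody]
  | cons x t ih =>
    by_cases hN : x = "N"
    · subst hN
      rw [show pvSplit ("N" :: t) cur = ((cur :: (pvSplit t []).1, (pvSplit t []).2)) from by
            simp [pvSplit]]
      rw [show pvBody criterion ("N" :: t) (cur.count "Y")
            = pvBlockC criterion (cur.count "Y") ++ ["N"] ++ pvBody criterion t 0 from by
            simp [pvBody]]
      rw [List.flatMap_cons, ih (cur := [])]
      simp
    · rw [show pvSplit (x :: t) cur = pvSplit t (cur ++ [x]) from by simp [pvSplit, hN]]
      rw [show pvBody criterion (x :: t) (cur.count "Y")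
            = pvBody criterion t (if x = "Y" then cur.count "Y" + 1 else cur.count "Y") from by
            simp [pvBody, hN]]
      rw [ih (cur := cur ++ [x])]
      by_cases hY : x = "Y"
      · subst hY
        simp [List.count_append]
      · have hc : (cur ++ [x]).count "Y" = cur.count "Y" := by
          simp [List.count_append, hY]
        rw [hc]
        simp [hY]

-- ===== VERDICT (by name: the statement is the Claim_ definition above) =====
theorem find_seq_y_spec : Claim_equal_find_seq_y := by
  intro data criterion _
  show find_seq_y data criterion = find_seq_y_alt data criterion
  have hB : find_seq_y_alt data criterion = pvBody criterion data 0 := by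
    show ((data.foldl pvSplitStep ([], [])).1).foldl (pvEmitStep criterion) [] = _
    rw [pvSplit_foldl data [] []]
    simp only [List.nil_append]
    rw [pvEmit_foldl, pvSplit_body]
    simp
  have hA : find_seq_y data criterion = pvBody criterion data 0 := by
    show ((PySem.List.enumerate data 0).foldl (pvStepA data criterion) ([], 0)).1 = _
    rw [PySem.List.foldl_congr_mem (PySem.List.enumerate data 0) (pvStepA data criterion)
          (fun st (p : Int × String) => pvStepA' criterion st p.2) ([], 0)
          (fun st p hp => pvStepA_eq data criterion st p hp)]
    rw [show List.foldl (fun st (p : Int × String) => pvStepA' criterion st p.2) ([], 0)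
            (PySem.List.enumerate data 0)
          = List.foldl (pvStepA' criterion) ([], 0) data from by
        rw [← List.foldl_map, PySem.List.map_snd_enumerate]]
    have := pvA_foldl criterion data [] 0
    simp only [Nat.cast_zero] at this
    rw [this]
    simp
  rw [hA, hB]
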